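-- pv_equiv track=rewrite | github.com/klark142/Introduction_to_Computer_Science | Zestaw_3/zad16.py | check
-- ===== SOURCE A (Python) =====
-- def check(t):
--     max, min = 0, 0
--     for i in range(len(t)):
--         if t[i] > max:
--             max = t[i]
--         if t[i] < min:
--             min = t[i]
--     max_count = 0
--     min_count = 0
--     for j in range(len(t)):
--         if t[j] == max:
--             max_count += 1
--         if t[j] == min:
--             min_count += 1
--     return max_count == 1 and min_count == 1
-- ===== SOURCE B (Python) =====
-- def check(t):
--     mx = mn = 0
--     mxc = mnc = 0
--     for x in t:
--         if x > mx:
--             mx, mxc = x, 1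
--         elif x == mx:
--             mxc += 1
--         if x < mn:
--             mn, mnc = x, 1
--         elif x == mn:
--             mnc += 1
--     return mxc == 1 and mnc == 1
-- ===== Notes on version B (the rewrite author's own statement) =====
-- stated objective: faster
-- what changed: B replaces A's two full passes (find the 0-seeded extremes, then count them) with a single sweep that tracks the running max/min together with reset-on-new-extremum occurrence counts.
import Mathlib
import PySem

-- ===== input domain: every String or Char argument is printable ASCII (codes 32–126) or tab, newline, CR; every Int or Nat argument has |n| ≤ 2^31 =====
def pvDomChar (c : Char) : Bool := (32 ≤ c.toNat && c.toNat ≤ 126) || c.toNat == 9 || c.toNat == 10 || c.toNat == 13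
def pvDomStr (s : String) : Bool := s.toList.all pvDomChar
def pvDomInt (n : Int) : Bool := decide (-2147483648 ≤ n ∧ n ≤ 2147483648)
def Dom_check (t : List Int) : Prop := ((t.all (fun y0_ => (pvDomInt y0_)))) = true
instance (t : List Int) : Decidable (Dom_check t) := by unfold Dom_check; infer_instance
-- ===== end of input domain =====

-- B merges A's extreme-finding pass and counting pass into one sweep with
-- reset-on-new-extremum counters (objective: faster by a constant factor, one pass instead of two).

-- ===== PORT A =====
-- one iteration of A's first loop: update running max, then running min
def stepA1 (s : Int × Int) (x : Int) : Int × Int :=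
  let s1 := if x > s.1 then (x, s.2) else s
  if x < s1.2 then (s1.1, x) else s1

-- one iteration of A's second loop: bump max_count, then min_count
def stepA2 (M m : Int) (c : Int × Int) (x : Int) : Int × Int :=
  let c1 := if x = M then (c.1 + 1, c.2) else c
  if x = m then (c1.1, c1.2 + 1) else c1

def check (t : List Int) : Bool :=
  let p := t.foldl stepA1 (0, 0)
  let c := t.foldl (stepA2 p.1 p.2) (0, 0)
  c.1 == 1 && c.2 == 1

-- ===== PORT B =====
-- one iteration of B's single loop over state (mx, mxc, mn, mnc)
def stepB (s : Int × Int × Int × Int) (x : Int) : Int × Int × Int × Int :=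
  let (mx, mxc, mn, mnc) := s
  let (mx, mxc) := if x > mx then (x, 1) else if x = mx then (mx, mxc + 1) else (mx, mxc)
  let (mn, mnc) := if x < mn then (x, 1) else if x = mn then (mn, mnc + 1) else (mn, mnc)
  (mx, mxc, mn, mnc)

def check_alt (t : List Int) : Bool :=
  let s := t.foldl stepB (0, 0, 0, 0)
  s.2.1 == 1 && s.2.2.2 == 1

-- ===== PRECONDITION & SPEC =====
def Spec_check (t : List Int) (out : Bool) : Prop := out = check_alt t
instance (t : List Int) (out : Bool) : Decidable (Spec_check t out) := by unfold Spec_check; infer_instance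

-- ===== CLAIM (what is proved, stated in full; the proofs are below) =====
def Claim_equal_check : Prop := ∀ (t : List Int), Dom_check t → Spec_check t (check t)

-- ===== LEMMAS AND PROOFS =====

def fmax (a x : Int) : Int := if x > a then x else a
def fmin (a x : Int) : Int := if x < a then x else a

-- the max-half and min-half of B's step, for factoring the 4-tuple fold
def stepMax (p : Int × Int) (x : Int) : Int × Int :=
  if x > p.1 then (x, 1) else if x = p.1 then (p.1, p.2 + 1) else p
def stepMin (p : Int × Int) (x : Int) : Int × Int :=
  if x < p.1 then (x, 1) else if x = p.1 then (p.1, p.2 + 1) else p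

lemma stepA1_eq (a b x : Int) : stepA1 (a, b) x = (fmax a x, fmin b x) := by
  simp only [stepA1, fmax, fmin]
  split_ifs <;> simp_all

lemma foldlA1 (t : List Int) : ∀ (a b : Int),
    t.foldl stepA1 (a, b) = (t.foldl fmax a, t.foldl fmin b) := by
  induction t with
  | nil => intro a b; rfl
  | cons x rest ih => intro a b; simp only [List.foldl_cons, stepA1_eq, ih]

lemma stepA2_eq (M m c1 c2 x : Int) :
    stepA2 M m (c1, c2) x = (c1 + (if x = M then 1 else 0), c2 + (if x = m then 1 else 0)) := by
  simp only [stepA2]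
  split_ifs <;> simp

lemma foldlA2 (M m : Int) (t : List Int) : ∀ (c1 c2 : Int),
    t.foldl (stepA2 M m) (c1, c2) = (c1 + (t.count M : Int), c2 + (t.count m : Int)) := by
  induction t with
  | nil => intro c1 c2; simp
  | cons x rest ih =>
    intro c1 c2
    simp only [List.foldl_cons, stepA2_eq, ih, List.count_cons, Prod.mk.injEq, beq_iff_eq]
    constructor <;> split_ifs <;> push_cast <;> omega

lemma stepB_eq (mx mxc mn mnc x : Int) :
    stepB (mx, mxc, mn, mnc) x =
      ((stepMax (mx, mxc) x).1, (stepMax (mx, mxc) x).2,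
       (stepMin (mn, mnc) x).1, (stepMin (mn, mnc) x).2) := by
  simp only [stepB, stepMax, stepMin]

lemma foldB_split (t : List Int) : ∀ (a b c d : Int),
    t.foldl stepB (a, b, c, d) =
      ((t.foldl stepMax (a, b)).1, (t.foldl stepMax (a, b)).2,
       (t.foldl stepMin (c, d)).1, (t.foldl stepMin (c, d)).2) := by
  induction t with
  | nil => intro a b c d; rfl
  | cons x rest ih =>
    intro a b c d
    simp only [List.foldl_cons, stepB_eq, ih]

lemma le_foldl_fmax (t : List Int) : ∀ (a : Int), a ≤ t.foldl fmax a := by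
  induction t with
  | nil => intro a; exact le_refl a
  | cons x rest ih =>
    intro a
    refine le_trans ?_ (ih (fmax a x))
    simp only [fmax]; split_ifs <;> omega

lemma foldl_fmin_le (t : List Int) : ∀ (a : Int), t.foldl fmin a ≤ a := by
  induction t with
  | nil => intro a; exact le_refl a
  | cons x rest ih =>
    intro a
    refine le_trans (ih (fmin a x)) ?_
    simp only [fmin]; split_ifs <;> omega

lemma foldMax (t : List Int) : ∀ (mx mxc : Int),
    t.foldl stepMax (mx, mxc) =
      (t.foldl fmax mx,
       (if t.foldl fmax mx = mx then mxc else 0) + (t.count (t.foldl fmax mx) : Int)) := by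
  induction t with
  | nil => intro mx mxc; simp
  | cons x rest ih =>
    intro mx mxc
    rcases lt_trichotomy mx x with h | h | h
    · -- x > mx : reset the counter
      have hstep : stepMax (mx, mxc) x = (x, 1) := by simp [stepMax, h]
      have hfm : fmax mx x = x := by simp [fmax, h]
      rw [List.foldl_cons, hstep, ih, List.foldl_cons, hfm, List.count_cons]
      have hx := le_foldl_fmax rest x
      have hne : List.foldl fmax x rest ≠ mx := by omega
      simp only [Prod.mk.injEq, beq_iff_eq]
      refine ⟨trivial, ?_⟩
      by_cases hMx : List.foldl fmax x rest = x <;> push_cast <;> simp [hMx, hne] <;> omega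
    · -- x = mx : increment
      subst h
      have hstep : stepMax (mx, mxc) mx = (mx, mxc + 1) := by simp [stepMax]
      have hfm : fmax mx mx = mx := by simp [fmax]
      rw [List.foldl_cons, hstep, ih, List.foldl_cons, hfm, List.count_cons]
      simp only [Prod.mk.injEq, beq_iff_eq]
      refine ⟨trivial, ?_⟩
      by_cases hMx : List.foldl fmax mx rest = mx <;> push_cast <;>
        simp [hMx, eq_comm] <;> omega
    · -- x < mx : unchanged
      have hstep : stepMax (mx, mxc) x = (mx, mxc) := by
        simp only [stepMax]; rw [if_neg (by omega), if_neg (by omega)]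
      have hfm : fmax mx x = mx := by simp only [fmax]; rw [if_neg (by omega)]
      rw [List.foldl_cons, hstep, ih, List.foldl_cons, hfm, List.count_cons]
      have hx := le_foldl_fmax rest mx
      have hne : x ≠ List.foldl fmax mx rest := by omega
      simp only [Prod.mk.injEq, beq_iff_eq]
      refine ⟨trivial, ?_⟩
      by_cases hMx : List.foldl fmax mx rest = mx <;> push_cast <;> simp [hMx, hne] <;> omega

lemma foldMin (t : List Int) : ∀ (mn mnc : Int),
    t.foldl stepMin (mn, mnc) =
      (t.foldl fmin mn,
       (if t.foldl fmin mn = mn then mnc else 0) + (t.count (t.foldl fmin mn) : Int)) := by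
  induction t with
  | nil => intro mn mnc; simp
  | cons x rest ih =>
    intro mn mnc
    rcases lt_trichotomy x mn with h | h | h
    · -- x < mn : reset the counter
      have hstep : stepMin (mn, mnc) x = (x, 1) := by simp [stepMin, h]
      have hfm : fmin mn x = x := by simp [fmin, h]
      rw [List.foldl_cons, hstep, ih, List.foldl_cons, hfm, List.count_cons]
      have hx := foldl_fmin_le rest x
      have hne : List.foldl fmin x rest ≠ mn := by omega
      simp only [Prod.mk.injEq, beq_iff_eq]
      refine ⟨trivial, ?_⟩
      by_cases hMx : List.foldl fmin x rest = x <;> push_cast <;> simp [hMx, hne] <;> omega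
    · -- x = mn : increment
      subst h
      have hstep : stepMin (x, mnc) x = (x, mnc + 1) := by simp [stepMin]
      have hfm : fmin x x = x := by simp [fmin]
      rw [List.foldl_cons, hstep, ih, List.foldl_cons, hfm, List.count_cons]
      simp only [Prod.mk.injEq, beq_iff_eq]
      refine ⟨trivial, ?_⟩
      by_cases hMx : List.foldl fmin x rest = x <;> push_cast <;>
        simp [hMx, eq_comm] <;> omega
    · -- x > mn : unchanged
      have hstep : stepMin (mn, mnc) x = (mn, mnc) := by
        simp only [stepMin]; rw [if_neg (by omega), if_neg (by omega)]
      have hfm : fmin mn x = mn := by simp only [fmin]; rw [if_neg (by omega)]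
      rw [List.foldl_cons, hstep, ih, List.foldl_cons, hfm, List.count_cons]
      have hx := foldl_fmin_le rest mn
      have hne : x ≠ List.foldl fmin mn rest := by omega
      simp only [Prod.mk.injEq, beq_iff_eq]
      refine ⟨trivial, ?_⟩
      by_cases hMx : List.foldl fmin mn rest = mn <;> push_cast <;> simp [hMx, hne] <;> omega

-- ===== VERDICT (by name: the statement is the Claim_ definition above) =====
theorem check_spec : Claim_equal_check := by
  intro t _
  unfold Spec_check check check_alt
  simp only [foldlA1, foldB_split, foldMax, foldMin, foldlA2, ite_self, zero_add]
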